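-- pv_equiv track=rewrite | github.com/Jingwenkuang/rosalind-solutions | bioinformatic/BoyerMooreExercise.py | naive_with_counts
-- ===== SOURCE A (Python) =====
-- def naive_with_counts(p, t):
--     occurrences = []
--     num_alignments = 0
--     num_char_comparisions = 0
--     for i in range(len(t) - len(p) + 1):
--         num_alignments += 1
--         match = True
--         for j in range(len(p)):
--             num_char_comparisions += 1
--             if t[i + j] != p[j]:
--                 match = False
--                 break
--         if match:
--             occurrences.append(i)
--     # return occurrences, num_alignments, num_char_comparisions
--     return num_alignments
-- ===== SOURCE B (Python) =====
-- def naive_with_counts(p, t):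
--     return max(0, len(t) - len(p) + 1)
-- ===== Notes on version B (the rewrite author's own statement) =====
-- stated objective: faster
-- what changed: Replaced the two nested counting loops with the closed form max(0, len(t)-len(p)+1): the returned counter equals the number of outer-loop iterations, which is just the length of the range.
import Mathlib
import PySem

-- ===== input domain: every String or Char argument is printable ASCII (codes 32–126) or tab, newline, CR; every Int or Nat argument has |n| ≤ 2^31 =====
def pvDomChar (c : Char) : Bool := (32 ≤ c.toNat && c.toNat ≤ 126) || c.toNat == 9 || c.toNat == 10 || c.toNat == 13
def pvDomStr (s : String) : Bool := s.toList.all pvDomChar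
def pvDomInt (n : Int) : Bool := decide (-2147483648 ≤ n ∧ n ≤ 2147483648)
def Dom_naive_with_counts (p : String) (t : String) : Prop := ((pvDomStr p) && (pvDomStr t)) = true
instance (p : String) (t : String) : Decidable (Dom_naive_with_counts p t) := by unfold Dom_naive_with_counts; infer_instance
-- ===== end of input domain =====

-- B replaces A's two nested counting loops with the closed form max(0, len(t)-len(p)+1) (objective: faster).

-- ===== PORT A =====
-- inner loop: 'for j in range(len(p)): …' with break; returns (num_char_comparisions, match)
def pvInnerA (pl tl : List Char) (i : Int) : List Int → Int → Int × Bool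
  | [], nc => (nc, true)
  | j :: js, nc =>
    let nc := nc + 1
    if PySem.List.pyGetD tl (i + j) ' ' ≠ PySem.List.pyGetD pl j ' ' then (nc, false)
    else pvInnerA pl tl i js nc

def naive_with_counts (p : String) (t : String) : Int :=
  let pl := p.toList
  let tl := t.toList
  -- state: (occurrences, num_alignments, num_char_comparisions)
  let st :=
    (PySem.List.pyRange 0 ((tl.length : Int) - (pl.length : Int) + 1) 1).foldl
      (fun (s : List Int × Int × Int) i =>
        let na := s.2.1 + 1
        let r := pvInnerA pl tl i (PySem.List.pyRange 0 (pl.length : Int) 1) s.2.2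
        if r.2 then (s.1 ++ [i], na, r.1) else (s.1, na, r.1))
      ([], 0, 0)
  st.2.1

-- ===== PORT B =====
def naive_with_counts_alt (p : String) (t : String) : Int :=
  max 0 ((t.toList.length : Int) - (p.toList.length : Int) + 1)

-- ===== PRECONDITION & SPEC =====
def Spec_naive_with_counts (p : String) (t : String) (out : Int) : Prop := out = naive_with_counts_alt p t
instance (p : String) (t : String) (out : Int) : Decidable (Spec_naive_with_counts p t out) := by unfold Spec_naive_with_counts; infer_instance

-- ===== CLAIM (what is proved, stated in full; the proofs are below) =====
def Claim_equal_naive_with_counts : Prop := ∀ (p : String) (t : String), Dom_naive_with_counts p t → Spec_naive_with_counts p t (naive_with_counts p t)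

-- ===== LEMMAS AND PROOFS =====

-- The second state component (num_alignments) grows by exactly 1 per iteration of A's outer loop.
theorem pvFoldNa (pl tl : List Char) (l : List Int) (s : List Int × Int × Int) :
    ((l.foldl
      (fun (s : List Int × Int × Int) i =>
        let na := s.2.1 + 1
        let r := pvInnerA pl tl i (PySem.List.pyRange 0 (pl.length : Int) 1) s.2.2
        if r.2 then (s.1 ++ [i], na, r.1) else (s.1, na, r.1))
      s).2.1) = s.2.1 + l.length := by
  induction l generalizing s with
  | nil => simp
  | cons x xs ih =>
    simp only [List.foldl_cons, ih]
    split <;> simp <;> omega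

-- ===== VERDICT (by name: the statement is the Claim_ definition above) =====
theorem naive_with_counts_spec : Claim_equal_naive_with_counts := by
  intro p t _
  unfold Spec_naive_with_counts naive_with_counts naive_with_counts_alt
  simp only [pvFoldNa, PySem.List.length_pyRange_one]
  omega
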